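-- pv_equiv track=rewrite | github.com/ShinYoung-hwan/Problem_Solving | Baekjoon/Problem_18000~18999/Problem_18111/Problem_18111_bsearch.py | solve
-- ===== SOURCE A (Python) =====
-- def get_nBlocks(ground, height):
--     # ground에서 height로 만드는데 필요한 블록의 개수, 양수는 필요한 개수, 음수는 얻게되는 개수
--     return sum([ sum([ height - cur_h for cur_h in side ]) for side in ground ])
--
-- def get_time(ground, height):
--     return sum([ sum([ ((height-cur_h) if (height-cur_h) >= 0 else -2*(height-cur_h)) for cur_h in side ]) for side in ground ])
--
-- def get_max_possible_height(ground, nBlocks):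
--     s, e = 0, 256
--     mid = (s+e) // 2
--
--     while s <= e:
--         cur_nBlocks = get_nBlocks(ground, mid)
--         if cur_nBlocks > nBlocks:
--             # 보유량보다 많은 경우는 유효 케이스가 아님.
--             e = mid - 1
--         else:
--             s = mid + 1
--         mid = (s+e) // 2
--
--     return mid
--
-- def solve(ground, nBlocks):
--     # 이진 탐색 알고리즘을 통한 최적의 높이 구하기
--     proper_height = 0
--     min_time = get_time(ground, 0)
--
--     s, e = 0, get_max_possible_height(ground, nBlocks)
--     mid = (s+e) // 2
--
--     while s <= e:
--         cur_time = get_time(ground, mid)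
--         prev_time = get_time(ground, mid-1)
--         next_time = get_time(ground, mid+1)
--
--         proper_height = mid
--         min_time = cur_time
--         if prev_time < cur_time < next_time:
--             e = mid - 1
--         elif prev_time >= cur_time >= next_time:
--             s = mid + 1
--         else:
--             break
--
--         mid = (s+e) // 2
--
--     return min_time, proper_height
-- ===== SOURCE B (Python) =====
-- def solve(ground, nBlocks):
--     # Flatten once; closed-form affordability cutoff, then a single linear scan
--     # over candidate heights keeping the lowest time (ties -> highest height).
--     xs = [c for side in ground for c in side]
--     n, s = len(xs), sum(xs)
--     if n > 0:
--         max_h = min(256, (nBlocks + s) // n)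
--     else:
--         max_h = 256 if nBlocks >= 0 else -1
--     def time_at(h):
--         return sum(h - c if h >= c else 2 * (c - h) for c in xs)
--     best_t, best_h = time_at(0), 0
--     for h in range(1, max_h + 1):
--         t = time_at(h)
--         if t <= best_t:
--             best_t, best_h = t, h
--     return best_t, best_h
-- ===== Notes on version B (the rewrite author's own statement) =====
-- stated objective: simpler
-- what changed: A's two binary searches (one for the affordability cutoff, one over the convex time function) are replaced by flattening the grid once, computing the cutoff height in closed form from the cell count and height sum, and taking the minimum time (ties -> highest height) by a single linear scan over the candidate heights.
import Mathlib
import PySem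

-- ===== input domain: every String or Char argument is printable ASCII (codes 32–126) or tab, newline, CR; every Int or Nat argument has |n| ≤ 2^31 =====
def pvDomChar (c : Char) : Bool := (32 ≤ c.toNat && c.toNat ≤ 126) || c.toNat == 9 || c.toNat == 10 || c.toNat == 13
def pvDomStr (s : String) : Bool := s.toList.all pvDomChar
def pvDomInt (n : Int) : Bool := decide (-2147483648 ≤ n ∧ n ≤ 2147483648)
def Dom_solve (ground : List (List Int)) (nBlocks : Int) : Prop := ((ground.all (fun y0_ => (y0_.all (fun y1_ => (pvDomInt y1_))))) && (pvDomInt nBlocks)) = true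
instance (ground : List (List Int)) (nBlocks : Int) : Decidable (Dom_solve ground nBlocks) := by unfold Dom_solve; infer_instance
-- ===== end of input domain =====

-- B replaces A's two binary searches by a closed-form affordability cutoff plus a
-- single linear scan over the candidate heights (objective: simpler; not faster).

-- ===== PORT A =====
def get_nBlocks (ground : List (List Int)) (height : Int) : Int :=
  (ground.map (fun side => (side.map (fun cur_h => height - cur_h)).sum)).sum

def get_time (ground : List (List Int)) (height : Int) : Int :=
  (ground.map (fun side =>
    (side.map (fun cur_h =>
      if height - cur_h ≥ 0 then height - cur_h else -2 * (height - cur_h))).sum)).sum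

-- the `while s <= e` loop of get_max_possible_height (mid = (s+e)//2 at each loop head)
def gmphLoop (ground : List (List Int)) (nBlocks : Int) (s e : Int) : Int :=
  if h : s ≤ e then
    if get_nBlocks ground (PySem.Int.floordiv (s + e) 2) > nBlocks then
      gmphLoop ground nBlocks s (PySem.Int.floordiv (s + e) 2 - 1)
    else
      gmphLoop ground nBlocks (PySem.Int.floordiv (s + e) 2 + 1) e
  else PySem.Int.floordiv (s + e) 2
termination_by (e + 1 - s).toNat
decreasing_by
  · have := PySem.Int.floordiv_two_mid_bounds h; omega
  · have := PySem.Int.floordiv_two_mid_bounds h; omega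

def get_max_possible_height (ground : List (List Int)) (nBlocks : Int) : Int :=
  gmphLoop ground nBlocks 0 256

-- the `while s <= e` loop of solve, carrying (min_time, proper_height)
def solveLoop (ground : List (List Int)) (s e min_time proper_height : Int) : Int × Int :=
  if h : s ≤ e then
    let mid := PySem.Int.floordiv (s + e) 2
    let cur_time := get_time ground mid
    let prev_time := get_time ground (mid - 1)
    let next_time := get_time ground (mid + 1)
    if prev_time < cur_time ∧ cur_time < next_time then
      solveLoop ground s (mid - 1) cur_time mid
    else if prev_time ≥ cur_time ∧ cur_time ≥ next_time then
      solveLoop ground (mid + 1) e cur_time mid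
    else (cur_time, mid)
  else (min_time, proper_height)
termination_by (e + 1 - s).toNat
decreasing_by
  · have := PySem.Int.floordiv_two_mid_bounds h; omega
  · have := PySem.Int.floordiv_two_mid_bounds h; omega

def solve (ground : List (List Int)) (nBlocks : Int) : Int × Int :=
  solveLoop ground 0 (get_max_possible_height ground nBlocks) (get_time ground 0) 0

-- ===== PORT B =====
def altTimeAt (xs : List Int) (h : Int) : Int :=
  (xs.map (fun c => if h ≥ c then h - c else 2 * (c - h))).sum

def solve_alt (ground : List (List Int)) (nBlocks : Int) : Int × Int :=
  let xs := ground.flatMap (fun side => side)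
  let n : Int := PySem.List.len xs
  let s : Int := xs.sum
  let max_h : Int :=
    if n > 0 then min 256 (PySem.Int.floordiv (nBlocks + s) n)
    else if nBlocks ≥ 0 then 256 else -1
  (PySem.List.pyRange 1 (max_h + 1) 1).foldl
    (fun best h => if altTimeAt xs h ≤ best.1 then (altTimeAt xs h, h) else best)
    (altTimeAt xs 0, 0)

-- ===== PRECONDITION & SPEC =====
def Spec_solve (ground : List (List Int)) (nBlocks : Int) (out : Int × Int) : Prop := out = solve_alt ground nBlocks
instance (ground : List (List Int)) (nBlocks : Int) (out : Int × Int) : Decidable (Spec_solve ground nBlocks out) := by unfold Spec_solve; infer_instance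

-- ===== CLAIM (what is proved, stated in full; the proofs are below) =====
def Claim_equal_solve : Prop := ∀ (ground : List (List Int)) (nBlocks : Int), Dom_solve ground nBlocks → Spec_solve ground nBlocks (solve ground nBlocks)

-- ===== LEMMAS AND PROOFS =====

-- A's nested get_time equals B's flat altTimeAt
theorem time_flat (g : List (List Int)) (h : Int) :
    get_time g h = altTimeAt (g.flatMap (fun side => side)) h := by
  induction g with
  | nil => rfl
  | cons side rest ih =>
    simp only [get_time, altTimeAt, List.flatMap_cons, List.map_cons, List.map_append,
      List.sum_cons, List.sum_append] at ih ⊢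
    rw [ih, List.map_congr_left (l := side)
      (g := fun c => if h ≥ c then h - c else 2 * (c - h))
      (fun c _ => by dsimp only; split_ifs <;> omega)]

-- get_nBlocks is linear: h * |xs| - sum xs over the flattened grid
theorem nblocks_val (g : List (List Int)) (h : Int) :
    get_nBlocks g h
      = h * ((g.flatMap (fun side => side)).length : Int) - (g.flatMap (fun side => side)).sum := by
  induction g with
  | nil => simp [get_nBlocks]
  | cons side rest ih =>
    have hside : (side.map (fun c => h - c)).sum = h * (side.length : Int) - side.sum := by
      induction side with
      | nil => simp
      | cons c cs ihc => simp only [List.map_cons, List.sum_cons, List.length_cons, ihc]; push_cast; ring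
    simp only [get_nBlocks, List.flatMap_cons, List.map_cons, List.sum_cons,
      List.length_append, List.sum_append] at ih ⊢
    rw [hside, ih]
    push_cast
    ring

theorem nb_mono (g : List (List Int)) {h1 h2 : Int} (h12 : h1 ≤ h2) :
    get_nBlocks g h1 ≤ get_nBlocks g h2 := by
  rw [nblocks_val, nblocks_val]
  have : h1 * ((g.flatMap (fun side => side)).length : Int)
       ≤ h2 * ((g.flatMap (fun side => side)).length : Int) :=
    mul_le_mul_of_nonneg_right h12 (by positivity)
  linarith

-- slope of altTimeAt is nondecreasing (convexity)
theorem delta_le (xs : List Int) {h1 h2 : Int} (h12 : h1 ≤ h2) :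
    altTimeAt xs (h1 + 1) - altTimeAt xs h1 ≤ altTimeAt xs (h2 + 1) - altTimeAt xs h2 := by
  induction xs with
  | nil => simp [altTimeAt]
  | cons c cs ih =>
    simp only [altTimeAt, List.map_cons, List.sum_cons] at ih ⊢
    have : ((if h1 + 1 ≥ c then h1 + 1 - c else 2 * (c - (h1 + 1))) - (if h1 ≥ c then h1 - c else 2 * (c - h1)))
         ≤ ((if h2 + 1 ≥ c then h2 + 1 - c else 2 * (c - (h2 + 1))) - (if h2 ≥ c then h2 - c else 2 * (c - h2))) := by
      split_ifs <;> omega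
    omega

-- strictly increasing to the right of a strictly increasing step
theorem strict_right (xs : List Int) {m : Int} (hd : altTimeAt xs m < altTimeAt xs (m + 1)) :
    ∀ h : Int, m < h → altTimeAt xs m < altTimeAt xs h := by
  have aux : ∀ k : Nat, altTimeAt xs m < altTimeAt xs (m + 1 + k) := by
    intro k
    induction k with
    | zero => simpa using hd
    | succ k ihk =>
      have hle := delta_le xs (show m ≤ m + 1 + (k : Int) by omega)
      push_cast
      rw [show m + 1 + ((k : Int) + 1) = m + 1 + (k : Int) + 1 by ring]
      omega
  intro h hm
  obtain ⟨k, rfl⟩ : ∃ k : Nat, h = m + 1 + k := ⟨(h - m - 1).toNat, by omega⟩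
  exact aux k

-- nonincreasing to the left of a nonincreasing step
theorem noninc_left (xs : List Int) {m : Int} (hd : altTimeAt xs (m + 1) ≤ altTimeAt xs m) :
    ∀ h : Int, h ≤ m → altTimeAt xs m ≤ altTimeAt xs h := by
  have aux : ∀ k : Nat, altTimeAt xs m ≤ altTimeAt xs (m - k) := by
    intro k
    induction k with
    | zero => simp
    | succ k ihk =>
      have hle := delta_le xs (show m - (k : Int) - 1 ≤ m by omega)
      rw [show m - (k : Int) - 1 + 1 = m - (k : Int) by ring] at hle
      push_cast
      rw [show m - ((k : Int) + 1) = m - (k : Int) - 1 by ring]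
      omega
  intro h hm
  obtain ⟨k, rfl⟩ : ∃ k : Nat, h = m - k := ⟨(m - h).toNat, by omega⟩
  exact aux k

-- B's fold, as a function of the scan bound (syntactically solve_alt's fold)
def scanGo (xs : List Int) (b : Int) : Int × Int :=
  (PySem.List.pyRange 1 b 1).foldl
    (fun best h => if altTimeAt xs h ≤ best.1 then (altTimeAt xs h, h) else best)
    (altTimeAt xs 0, 0)

-- characterisation of B's linear scan over heights 0..k: minimum value, rightmost argmin
theorem scanP (xs : List Int) (k : Nat) :
    0 ≤ (scanGo xs ((k : Int) + 1)).2 ∧ (scanGo xs ((k : Int) + 1)).2 ≤ (k : Int) ∧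
      (scanGo xs ((k : Int) + 1)).1 = altTimeAt xs (scanGo xs ((k : Int) + 1)).2 ∧
      (∀ h : Int, 0 ≤ h → h ≤ (k : Int) → altTimeAt xs (scanGo xs ((k : Int) + 1)).2 ≤ altTimeAt xs h) ∧
      (∀ h : Int, (scanGo xs ((k : Int) + 1)).2 < h → h ≤ (k : Int) →
        altTimeAt xs (scanGo xs ((k : Int) + 1)).2 < altTimeAt xs h) := by
  induction k with
  | zero =>
    have h0 : PySem.List.pyRange (1 : Int) ((0 : Int) + 1) 1 = [] := by decide
    simp only [Nat.cast_zero, scanGo, h0, List.foldl_nil]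
    refine ⟨le_refl _, le_refl _, by trivial, ?_, ?_⟩
    · intro h h0 h1
      have : h = 0 := by omega
      simp [this]
    · intro h h1 h2; omega
  | succ k ih =>
    have hrw : PySem.List.pyRange (1 : Int) (((k + 1 : Nat) : Int) + 1) 1
        = PySem.List.pyRange 1 ((k : Int) + 1) 1 ++ [(k : Int) + 1] := by
      push_cast
      exact PySem.List.pyRange_one_succ_right (by omega)
    have hstep : scanGo xs (((k + 1 : Nat) : Int) + 1)
        = (if altTimeAt xs ((k : Int) + 1) ≤ (scanGo xs ((k : Int) + 1)).1
           then (altTimeAt xs ((k : Int) + 1), (k : Int) + 1)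
           else scanGo xs ((k : Int) + 1)) := by
      rw [scanGo, hrw, List.foldl_append]
      rfl
    obtain ⟨ih0, ih1, ih2, ih3, ih4⟩ := ih
    rw [hstep]
    by_cases hc : altTimeAt xs ((k : Int) + 1) ≤ (scanGo xs ((k : Int) + 1)).1
    · rw [if_pos hc]
      push_cast
      refine ⟨by omega, by omega, rfl, ?_, ?_⟩
      · intro h hh0 hh1
        rcases lt_or_ge h ((k : Int) + 1) with hlt | hge
        · calc altTimeAt xs ((k : Int) + 1) ≤ (scanGo xs ((k : Int) + 1)).1 := hc
            _ = altTimeAt xs (scanGo xs ((k : Int) + 1)).2 := ih2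
            _ ≤ altTimeAt xs h := ih3 h hh0 (by omega)
        · have : h = (k : Int) + 1 := by omega
          simp [this]
      · intro h hh1 hh2; omega
    · rw [if_neg hc]
      push_cast
      refine ⟨ih0, by omega, ih2, ?_, ?_⟩
      · intro h hh0 hh1
        rcases lt_or_ge h ((k : Int) + 1) with hlt | hge
        · exact ih3 h hh0 (by omega)
        · have : h = (k : Int) + 1 := by omega
          rw [this, ← ih2]; omega
      · intro h hh1 hh2
        rcases lt_or_ge h ((k : Int) + 1) with hlt | hge
        · exact ih4 h hh1 (by omega)
        · have : h = (k : Int) + 1 := by omega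
          rw [this, ← ih2]; omega

-- unfolding lemmas for solveLoop
theorem solveLoop_stop (g : List (List Int)) (s e a b : Int) (hse : ¬ s ≤ e) :
    solveLoop g s e a b = (a, b) := by
  rw [solveLoop, dif_neg hse]

theorem solveLoop_eq (g : List (List Int)) (s e a b : Int) (hse : s ≤ e) :
    solveLoop g s e a b =
      (if get_time g (PySem.Int.floordiv (s + e) 2 - 1) < get_time g (PySem.Int.floordiv (s + e) 2)
          ∧ get_time g (PySem.Int.floordiv (s + e) 2) < get_time g (PySem.Int.floordiv (s + e) 2 + 1) then
        solveLoop g s (PySem.Int.floordiv (s + e) 2 - 1)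
          (get_time g (PySem.Int.floordiv (s + e) 2)) (PySem.Int.floordiv (s + e) 2)
      else if get_time g (PySem.Int.floordiv (s + e) 2 - 1) ≥ get_time g (PySem.Int.floordiv (s + e) 2)
          ∧ get_time g (PySem.Int.floordiv (s + e) 2) ≥ get_time g (PySem.Int.floordiv (s + e) 2 + 1) then
        solveLoop g (PySem.Int.floordiv (s + e) 2 + 1) e
          (get_time g (PySem.Int.floordiv (s + e) 2)) (PySem.Int.floordiv (s + e) 2)
      else (get_time g (PySem.Int.floordiv (s + e) 2), PySem.Int.floordiv (s + e) 2)) := by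
  rw [solveLoop, dif_pos hse]

theorem fdiv_end (e : Int) : PySem.Int.floordiv (e + 1 + e) 2 = e := by
  have := PySem.Int.floordiv_eq_iff_of_pos (a := e + 1 + e) (b := 2) (q := e) (by omega)
  omega

theorem pyRange_empty (b : Int) (hb : b ≤ 1) : PySem.List.pyRange 1 b 1 = [] := by
  simp [PySem.List.pyRange]; omega

-- invariant of A's first binary search: it returns the largest affordable height in [0,256] (or -1)
theorem bs1 (g : List (List Int)) (nB : Int) (s e : Int) (hs : 0 ≤ s) (he : e ≤ 256)
    (hse : s ≤ e + 1)
    (hlo : ∀ h : Int, 0 ≤ h → h < s → get_nBlocks g h ≤ nB)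
    (hhi : ∀ h : Int, e < h → h ≤ 256 → ¬ get_nBlocks g h ≤ nB) :
    -1 ≤ gmphLoop g nB s e ∧ gmphLoop g nB s e ≤ 256 ∧
      (∀ h : Int, 0 ≤ h → h ≤ gmphLoop g nB s e → get_nBlocks g h ≤ nB) ∧
      (∀ h : Int, gmphLoop g nB s e < h → h ≤ 256 → ¬ get_nBlocks g h ≤ nB) := by
  rw [gmphLoop]
  by_cases hcase : s ≤ e
  · rw [dif_pos hcase]
    have hmid := PySem.Int.floordiv_two_mid_bounds hcase
    by_cases hgt : get_nBlocks g (PySem.Int.floordiv (s + e) 2) > nB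
    · rw [if_pos hgt]
      refine bs1 g nB s (PySem.Int.floordiv (s + e) 2 - 1) hs (by omega) (by omega) hlo ?_
      intro h hh1 hh2 hP
      rcases lt_or_ge e h with hgt2 | hle2
      · exact hhi h hgt2 hh2 hP
      · exact absurd (le_trans (nb_mono g (by omega : PySem.Int.floordiv (s + e) 2 ≤ h)) hP)
          (by omega)
    · rw [if_neg hgt]
      refine bs1 g nB (PySem.Int.floordiv (s + e) 2 + 1) e (by omega) he (by omega) ?_ hhi
      intro h hh1 hh2
      rcases lt_or_ge h s with hlt2 | hge2
      · exact hlo h hh1 hlt2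
      · exact le_trans (nb_mono g (by omega : h ≤ PySem.Int.floordiv (s + e) 2)) (by omega)
  · rw [dif_neg hcase]
    have hseq : s = e + 1 := by omega
    subst hseq
    rw [fdiv_end]
    exact ⟨by omega, he, fun h hh1 hh2 => hlo h hh1 (by omega), hhi⟩
termination_by (e + 1 - s).toNat
decreasing_by
  · have := PySem.Int.floordiv_two_mid_bounds hcase; omega
  · have := PySem.Int.floordiv_two_mid_bounds hcase; omega

-- invariant of A's second binary search: with (bt, bh) the minimum value and its
-- rightmost argmin over [0, m], the loop run inside [s, e] ∋ bh returns (bt, bh)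
theorem bs2 (g : List (List Int)) (xs : List Int)
    (hG : ∀ h : Int, get_time g h = altTimeAt xs h) (m bt bh : Int)
    (hbh0 : 0 ≤ bh) (hval : bt = altTimeAt xs bh)
    (hmin : ∀ h : Int, 0 ≤ h → h ≤ m → altTimeAt xs bh ≤ altTimeAt xs h)
    (hstrict : ∀ h : Int, bh < h → h ≤ m → altTimeAt xs bh < altTimeAt xs h)
    (s e a b : Int) (hs0 : 0 ≤ s) (hem : e ≤ m) (hsb : s ≤ bh) (hbe : bh ≤ e) :
    solveLoop g s e a b = (bt, bh) := by
  have hse : s ≤ e := le_trans hsb hbe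
  have hmid := PySem.Int.floordiv_two_mid_bounds hse
  rw [solveLoop_eq g s e a b hse]
  simp only [hG]
  set mid := PySem.Int.floordiv (s + e) 2 with hmiddef
  by_cases hc1 : altTimeAt xs (mid - 1) < altTimeAt xs mid ∧ altTimeAt xs mid < altTimeAt xs (mid + 1)
  · rw [if_pos hc1]
    by_cases hb1 : bh ≤ mid - 1
    · exact bs2 g xs hG m bt bh hbh0 hval hmin hstrict s (mid - 1) (altTimeAt xs mid) mid
        hs0 (by omega) hsb hb1
    · have hbm : bh = mid := by
        by_contra hne
        have hgt : mid < bh := by omega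
        have := strict_right xs (m := mid) hc1.2 bh hgt
        have := hmin mid (by omega) (by omega)
        omega
      have hsm : ¬ s ≤ mid - 1 := by
        intro hsle
        have h1 := hmin (mid - 1) (by omega) (by omega)
        rw [hbm] at h1
        omega
      rw [solveLoop_stop g s (mid - 1) _ _ hsm]
      exact Prod.ext (by rw [hval, hbm]) (by rw [hbm])
  · rw [if_neg hc1]
    by_cases hc2 : altTimeAt xs (mid - 1) ≥ altTimeAt xs mid ∧ altTimeAt xs mid ≥ altTimeAt xs (mid + 1)
    · rw [if_pos hc2]
      by_cases hb2 : mid + 1 ≤ bh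
      · exact bs2 g xs hG m bt bh hbh0 hval hmin hstrict (mid + 1) e (altTimeAt xs mid) mid
          (by omega) hem hb2 hbe
      · have hnil := noninc_left xs (m := mid) hc2.2
        have hbm : bh = mid := by
          by_contra hne
          have hlt : bh < mid := by omega
          have h1 := hnil bh (by omega)
          have h2 := hstrict mid hlt (by omega)
          omega
        have hme : mid = e := by
          by_contra hne
          have hlt : mid < e := by omega
          have h1 := hstrict (mid + 1) (by omega) (by omega)
          rw [hbm] at h1
          omega
        have hstop : ¬ mid + 1 ≤ e := by omega
        rw [solveLoop_stop g (mid + 1) e _ _ hstop]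
        exact Prod.ext (by rw [hval, hbm]) (by rw [hbm])
    · rw [if_neg hc2]
      by_cases hA : altTimeAt xs (mid - 1) ≥ altTimeAt xs mid
      · have hcn : altTimeAt xs mid < altTimeAt xs (mid + 1) := by
          rcases not_and_or.mp hc2 with h | h
          · omega
          · omega
        have hsr := strict_right xs (m := mid) hcn
        have hnl := noninc_left xs (m := mid - 1) (by
          rw [show mid - 1 + 1 = mid by ring]; omega)
        have hbm : bh = mid := by
          rcases lt_trichotomy bh mid with hlt | heq | hgt
          · have h1 := hnl bh (by omega)
            have h2 := hstrict mid hlt (by omega)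
            omega
          · exact heq
          · have h1 := hsr bh hgt
            have h2 := hmin mid (by omega) (by omega)
            omega
        exact Prod.ext (by rw [hval, hbm]) (by rw [hbm])
      · have h1 : altTimeAt xs (mid - 1) < altTimeAt xs mid := by omega
        have h2 : altTimeAt xs (mid + 1) ≤ altTimeAt xs mid := by
          rcases not_and_or.mp hc1 with h | h
          · omega
          · omega
        have h3 := delta_le xs (show mid - 1 ≤ mid by omega)
        rw [show mid - 1 + 1 = mid by ring] at h3
        omega
termination_by (e + 1 - s).toNat
decreasing_by
  · omega
  · omega

-- ===== VERDICT (by name: the statement is the Claim_ definition above) =====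
theorem solve_spec : Claim_equal_solve := by
  intro g nB _
  unfold Spec_solve
  have hG : ∀ h : Int, get_time g h = altTimeAt (g.flatMap (fun side => side)) h :=
    fun h => time_flat g h
  have hNB : ∀ h : Int, get_nBlocks g h
      = h * ((g.flatMap (fun side => side)).length : Int) - (g.flatMap (fun side => side)).sum :=
    fun h => nblocks_val g h
  obtain ⟨hr1, hr2, hrP, hrN⟩ := bs1 g nB 0 256 (by omega) (by omega) (by omega)
    (fun h hh1 hh2 => (by omega : False).elim)
    (fun h hh1 hh2 => (by omega : False).elim)
  have hsolve : solve g nB = solveLoop g 0 (gmphLoop g nB 0 256) (get_time g 0) 0 := rfl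
  have halt : solve_alt g nB = scanGo (g.flatMap (fun side => side))
      ((if PySem.List.len (g.flatMap (fun side => side)) > 0
        then min 256 (PySem.Int.floordiv (nB + (g.flatMap (fun side => side)).sum)
          (PySem.List.len (g.flatMap (fun side => side))))
        else if nB ≥ 0 then (256 : Int) else -1) + 1) := rfl
  set xs := g.flatMap (fun side => side) with hxsdef
  set r := gmphLoop g nB 0 256 with hrdef
  set q : Int := (if PySem.List.len xs > 0
      then min 256 (PySem.Int.floordiv (nB + xs.sum) (PySem.List.len xs))
      else if nB ≥ 0 then (256 : Int) else -1) with hqdef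
  have hlen : PySem.List.len xs = (xs.length : Int) := PySem.List.len_eq xs
  by_cases hr : 0 ≤ r
  · -- some height in [0,256] is affordable; r is the largest such, and equals B's cutoff q
    have hPr := hrP r hr (le_refl r)
    rw [hNB] at hPr
    have hq : q = r := by
      by_cases hn : xs.length = 0
      · have hxnil : xs = [] := List.length_eq_zero_iff.mp hn
        have hnb : 0 ≤ nB := by
          rw [hxnil] at hPr
          simpa using hPr
        have hr256 : r = 256 := by
          by_contra hne
          have := hrN (r + 1) (by omega) (by omega)
          rw [hNB, hxnil] at this
          simp at this
          omega
        rw [hqdef, hlen, hn, hr256]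
        norm_num [hnb]
      · have hpos : (0 : Int) < (xs.length : Int) := by
          have : 0 < xs.length := Nat.pos_of_ne_zero hn
          exact_mod_cast this
        have hq1 : r ≤ PySem.Int.floordiv (nB + xs.sum) ((xs.length : Int)) :=
          (PySem.Int.le_floordiv_iff_mul_le hpos).mpr (by linarith)
        have hcond : PySem.List.len xs > 0 := by rw [hlen]; exact hpos
        rw [hqdef, if_pos hcond, hlen]
        rcases eq_or_lt_of_le hr2 with h256 | hlt256
        · rw [h256, min_def]
          split_ifs <;> omega
        · have hn1 := hrN (r + 1) (by omega) (by omega)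
          rw [hNB] at hn1
          have hq2 : PySem.Int.floordiv (nB + xs.sum) ((xs.length : Int)) < r + 1 :=
            (PySem.Int.floordiv_lt_iff_lt_mul hpos).mpr (by linarith)
          rw [min_def]
          split_ifs <;> omega
    obtain ⟨p0, p1, p2, p3, p4⟩ := scanP xs r.toNat
    rw [show ((r.toNat : Int)) = r by omega] at p0 p1 p2 p3 p4
    rw [hsolve, halt, hq]
    exact (bs2 g xs hG r (scanGo xs (r + 1)).1 (scanGo xs (r + 1)).2 p0 p2 p3 p4
      0 r (get_time g 0) 0 (by omega) (le_refl r) p0 p1).trans Prod.mk.eta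
  · -- no height in [0,256] is affordable: both sides return (time(0), 0)
    have hN0 := hrN 0 (by omega) (by omega)
    rw [hNB] at hN0
    have hS : nB + xs.sum < 0 := by
      simp only [zero_mul, zero_sub] at hN0
      omega
    have hq : q < 0 := by
      by_cases hn : xs.length = 0
      · have hxnil : xs = [] := List.length_eq_zero_iff.mp hn
        have hnb : ¬ nB ≥ 0 := by
          rw [hxnil] at hS
          simpa using hS
        have hcond : ¬ PySem.List.len xs > 0 := by
          rw [hlen, hn]; simp
        rw [hqdef, if_neg hcond, if_neg hnb]
        omega
      · have hpos : (0 : Int) < (xs.length : Int) := by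
          have : 0 < xs.length := Nat.pos_of_ne_zero hn
          exact_mod_cast this
        have hcond : PySem.List.len xs > 0 := by rw [hlen]; exact hpos
        have hq2 : PySem.Int.floordiv (nB + xs.sum) ((xs.length : Int)) < 0 :=
          (PySem.Int.floordiv_lt_iff_lt_mul hpos).mpr (by linarith)
        rw [hqdef, if_pos hcond, hlen]
        rw [min_def]
        split_ifs <;> omega
    have hempty : PySem.List.pyRange 1 (q + 1) 1 = [] := pyRange_empty (q + 1) (by omega)
    rw [hsolve, halt]
    rw [solveLoop_stop g 0 r _ _ (by omega)]
    simp only [scanGo, hempty, List.foldl_nil, hG]
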